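-- pv_equiv track=rewrite | github.com/sositon/Intro2CS | Ex_12/ex12_utils.py | max_score_paths
-- ===== SOURCE A (Python) =====
-- X = 0
--
-- Y = 1
--
-- def still_in_board(board, cord):
--     """:return True if cord in board"""
--     return 0 <= cord[X] < len(board) and 0 <= cord[Y] < len(board[X])
--
-- def max_score_paths(board, words):
--     """
--     :param board:  list of lists represents the game board
--     :param words: a container that hold the game words data
--     :return: list of the longest path for each word in board.
--     """
--     word_to_paths = {word: [] for word in words}
--
--     def fill_found_paths(left_from_word, current_path):
--         """:return a path for every word in board"""
--         if not left_from_word: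
--             word_to_paths[path_to_word(board, current_path)].append(
--                 current_path)
--             return
--         for next_cord in generate_neighbors(current_path[-1]):
--             if next_cord not in current_path:
--                 if still_in_board(board, next_cord):
--                     if board[next_cord[X]][next_cord[Y]] == left_from_word[0]:
--                         fill_found_paths(left_from_word[1:],
--                                          current_path + [next_cord])
--
--     def max_len_path(paths):
--         """:return the longest path for each word"""
--         max_len_path, max_len = None, 0
--         for path in paths:
--             if len(path) > max_len:
--                 max_len = len(path)
--                 max_len_path = path
--         return max_len_path
--
--     # function call
--     for i in range(len(board)):
--         for j in range(len(board[i])):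
--             for word in words:
--                 if board[i][j] == word[0]:
--                     fill_found_paths(word[1:], [(i, j)])
--
--     return [max_len_path(paths) for paths in word_to_paths.values() if paths]
--
-- def generate_neighbors(cur):
--     """
--     gets a tuple and generate 8 new tuples represent neighbors of the
--     current cord in a 2D matrix
--     """
--     cur = list(cur)
--     for i in range(2):
--         cur[i] -= 1
--         yield tuple(cur)
--         cur[i] += 2
--         yield tuple(cur)
--         cur[i] -= 1
--     yield cur[X] - 1, cur[Y] - 1
--     yield cur[X] - 1, cur[Y] + 1
--     yield cur[X] + 1, cur[Y] + 1
--     yield cur[X] + 1, cur[Y] - 1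
--
-- def path_to_word(board, path):
--     word = ''
--     for cord in path:
--         x, y = cord
--         word += board[x][y]
--     return word
-- ===== SOURCE B (Python) =====
-- def max_score_paths(board, words):
--     """Return, for each distinct word in first-occurrence order, the first
--     board path (row-major start cell, fixed neighbor order) spelling it.
--     Every complete path for a word has the word's length, so A's
--     'longest path' is simply the first path found; B therefore stops at
--     the first complete path instead of enumerating them all."""
--
--     def first_path(path, rest):
--         # depth-first search for the first completion of `path` spelling `rest`
--         if not rest:
--             return path
--         x, y = path[-1]
--         for nc in ((x - 1, y), (x + 1, y), (x, y - 1), (x, y + 1),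
--                    (x - 1, y - 1), (x - 1, y + 1), (x + 1, y + 1), (x + 1, y - 1)):
--             nx, ny = nc
--             if nc not in path and 0 <= nx < len(board) \
--                     and 0 <= ny < len(board[nx]) and board[nx][ny] == rest[0]:
--                 p = first_path(path + [nc], rest[1:])
--                 if p is not None:
--                     return p
--         return None
--
--     result = []
--     seen = set()
--     for word in words:
--         if word in seen:
--             continue
--         seen.add(word)
--         found = None
--         for i in range(len(board)):
--             for j in range(len(board[i])):
--                 if board[i][j] == word[0]:
--                     found = first_path([(i, j)], word[1:])
--                     if found is not None:
--                         break
--             if found is not None: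
--                 break
--         if found:
--             result.append(found)
--     return result
-- ===== Notes on version B (the rewrite author's own statement) =====
-- stated objective: alternative
-- what changed: B searches depth-first for the FIRST complete path of each distinct word and stops there (every complete path has exactly the word's length, so A's max-length scan always selects the first stored path), instead of enumerating and storing every path for every word occurrence in a dict and then scanning each list for a longest one.
-- outside the precondition, e.g. on max_score_paths([['a'], ['b', 'c']], ['ac']): A returns [], B returns [[(0, 0), (1, 1)]]
import Mathlib
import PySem

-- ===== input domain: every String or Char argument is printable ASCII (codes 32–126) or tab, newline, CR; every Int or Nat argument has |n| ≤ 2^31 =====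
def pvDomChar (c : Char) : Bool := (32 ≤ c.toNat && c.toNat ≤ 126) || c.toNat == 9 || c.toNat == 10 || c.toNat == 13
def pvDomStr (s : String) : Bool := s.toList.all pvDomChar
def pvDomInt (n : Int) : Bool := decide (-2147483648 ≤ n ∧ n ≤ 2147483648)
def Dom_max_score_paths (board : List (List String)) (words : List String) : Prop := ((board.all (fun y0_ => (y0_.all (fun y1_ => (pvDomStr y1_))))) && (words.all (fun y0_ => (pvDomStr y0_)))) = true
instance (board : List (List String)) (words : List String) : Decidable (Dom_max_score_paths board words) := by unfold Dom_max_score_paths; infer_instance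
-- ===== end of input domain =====

-- B finds the FIRST complete path of each distinct word and stops there (every complete
-- path has exactly the word's length, so A's max-length scan always picks the first
-- stored path), instead of enumerating every path into a dict and scanning for a longest.

-- ===== PORT A =====
-- strings are handled as their character lists (PySem.Chars is the definition layer);
-- board[x][y] is only evaluated by A after its bounds test, so the `.getD ""` default is never the result
def pvCellChars (board : List (List String)) (c : Int × Int) : List Char :=
  (((PySem.List.pyGet? board c.1).bind (fun row => PySem.List.pyGet? row c.2)).getD "").toList

-- generate_neighbors, in the generator's yield order
def pvNeighbors (cur : Int × Int) : List (Int × Int) :=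
  [(cur.1 - 1, cur.2), (cur.1 + 1, cur.2), (cur.1, cur.2 - 1), (cur.1, cur.2 + 1),
   (cur.1 - 1, cur.2 - 1), (cur.1 - 1, cur.2 + 1), (cur.1 + 1, cur.2 + 1), (cur.1 + 1, cur.2 - 1)]

-- still_in_board: note Python's `len(board[X])` is `len(board[0])` (X = 0); board[0] is only
-- reached when 0 <= cord.1 < len(board), so the `.getD []` default is never the tested row
def still_in_board (board : List (List String)) (cord : Int × Int) : Bool :=
  (decide (0 ≤ cord.1) && decide (cord.1 < (board.length : Int))) &&
  (decide (0 ≤ cord.2) && decide (cord.2 < ((PySem.List.pyGetD board 0 []).length : Int)))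

def path_to_word (board : List (List String)) (path : List (Int × Int)) : List Char :=
  path.foldl (fun w c => w ++ pvCellChars board c) []

-- fill_found_paths; Python's `word_to_paths[...].append` raises KeyError on a missing key,
-- which never happens inside Pre_ (the key is always the word searched); modify is exact there
def pvFill (board : List (List String)) :
    List Char → List (Int × Int) → PySem.Dict (List Char) (List (List (Int × Int))) →
    PySem.Dict (List Char) (List (List (Int × Int)))
  | [], path, d => d.modify (path_to_word board path) [] (fun l => l ++ [path])
  | c :: rest, path, d =>
    (pvNeighbors ((PySem.List.pyGet? path (-1)).getD (0, 0))).foldl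
      (fun d' nc =>
        if nc ∉ path then
          if still_in_board board nc then
            if pvCellChars board nc == [c] then pvFill board rest (path ++ [nc]) d'
            else d'
          else d'
        else d')
      d

def pvMaxLenPath (paths : List (List (Int × Int))) : Option (List (Int × Int)) :=
  (paths.foldl
    (fun acc path => if path.length > acc.2 then (some path, path.length) else acc)
    ((none : Option (List (Int × Int))), 0)).1

-- word[0] raises IndexError on an empty word: excluded by Pre_ when any cell exists
-- (the `.getD []` placeholder is then never compared); max_len_path returns None only on
-- an empty list, which the comprehension filters out, so `.getD []` is never the result
def max_score_paths (board : List (List String)) (words : List String) : List (List (Int × Int)) :=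
  let d0 : PySem.Dict (List Char) (List (List (Int × Int))) :=
    words.foldl (fun d w => d.insert w.toList []) PySem.Dict.empty
  let d :=
    (PySem.List.pyRange 0 (board.length : Int) 1).foldl
      (fun d i =>
        (PySem.List.pyRange 0 ((PySem.List.pyGetD board i []).length : Int) 1).foldl
          (fun d j =>
            words.foldl
              (fun d w =>
                if pvCellChars board (i, j) ==
                    ((PySem.List.pyGet? w.toList 0).map (fun ch => [ch])).getD [] then
                  pvFill board (PySem.List.slice w.toList (some 1) none) [(i, j)] d
                else d)
              d)
          d)
      d0
  (d.values.filter (fun paths => !paths.isEmpty)).map (fun paths => (pvMaxLenPath paths).getD [])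

-- ===== PORT B =====
-- first_path: first DFS completion of `path` spelling `rest`, or none;
-- the candidate tuple is Source B's inline neighbor tuple, in order
def pvFirstPath (board : List (List String)) :
    List (Int × Int) → List Char → Option (List (Int × Int))
  | path, [] => some path
  | path, c :: rest =>
    (fun (cur : Int × Int) =>
      [(cur.1 - 1, cur.2), (cur.1 + 1, cur.2), (cur.1, cur.2 - 1), (cur.1, cur.2 + 1),
       (cur.1 - 1, cur.2 - 1), (cur.1 - 1, cur.2 + 1), (cur.1 + 1, cur.2 + 1), (cur.1 + 1, cur.2 - 1)])
      ((PySem.List.pyGet? path (-1)).getD (0, 0)) |>.findSome?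
      (fun nc =>
        if nc ∉ path ∧ (0 ≤ nc.1 ∧ nc.1 < (board.length : Int)) ∧
            (0 ≤ nc.2 ∧ nc.2 < ((PySem.List.pyGetD board nc.1 []).length : Int)) ∧
            pvCellChars board nc = [c] then
          pvFirstPath board (path ++ [nc]) rest
        else none)

-- the board cells in row-major order (Source B's nested i/j loops with break = first success)
def pvCells (board : List (List String)) : List (Int × Int) :=
  (List.range board.length).flatMap
    (fun i => (List.range (board.getD i []).length).map (fun (j : Nat) => ((i : Int), (j : Int))))

def max_score_paths_alt (board : List (List String)) (words : List String) :
    List (List (Int × Int)) :=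
  (words.foldl
    (fun (acc : List (List (Int × Int)) × PySem.Set String) w =>
      if acc.2.contains w then acc
      else
        let found :=
          (pvCells board).findSome?
            (fun c =>
              if pvCellChars board c ==
                  ((PySem.List.pyGet? w.toList 0).map (fun ch => [ch])).getD [] then
                pvFirstPath board [c] (PySem.List.slice w.toList (some 1) none)
              else none)
        ((if (found.getD []).isEmpty then acc.1 else acc.1 ++ [found.getD []]),
          acc.2.add w))
    ([], PySem.Set.empty)).1

-- ===== PRECONDITION & SPEC =====
-- Pre_ restricts to rectangular boards — A's still_in_board tests every column index against
-- len(board[0]), so on a ragged board A can raise IndexError (row shorter than row 0) or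
-- silently reject in-board cells (row longer than row 0) — and excludes an empty word when
-- the board has a cell, where A raises IndexError on word[0].
def Pre_max_score_paths (board : List (List String)) (words : List String) : Prop :=
  (∀ row ∈ board, row.length = (board.headD []).length) ∧
  ¬(board.headD [] ≠ [] ∧ "" ∈ words)
instance (board : List (List String)) (words : List String) :
    Decidable (Pre_max_score_paths board words) := by
  unfold Pre_max_score_paths; infer_instance

def pvWitness_max_score_paths : List (List String) × List String :=
  ([["a", "b"], ["c", "d"]], ["ab", "db", "z", "ab"])

def Spec_max_score_paths (board : List (List String)) (words : List String)
    (out : List (List (Int × Int))) : Prop := out = max_score_paths_alt board words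
instance (board : List (List String)) (words : List String) (out : List (List (Int × Int))) :
    Decidable (Spec_max_score_paths board words out) := by
  unfold Spec_max_score_paths; infer_instance

-- ===== CLAIM (what is proved, stated in full; the proofs are below) =====
def Claim_equal_max_score_paths : Prop := ∀ (board : List (List String)) (words : List String), Dom_max_score_paths board words → Pre_max_score_paths board words → Spec_max_score_paths board words (max_score_paths board words)

-- ===== LEMMAS AND PROOFS =====

-- proof-side pure description of fill_found_paths: all completed extensions, in DFS order
def pvAllPaths (board : List (List String)) :
    List Char → List (Int × Int) → List (List (Int × Int))
  | [], path => [path]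
  | c :: rest, path =>
    (pvNeighbors ((PySem.List.pyGet? path (-1)).getD (0, 0))).flatMap
      (fun nc =>
        if nc ∉ path then
          if still_in_board board nc then
            if pvCellChars board nc == [c] then pvAllPaths board rest (path ++ [nc])
            else []
          else []
        else [])

def pvStep (d : PySem.Dict (List Char) (List (List (Int × Int))))
    (pr : List Char × List (Int × Int)) : PySem.Dict (List Char) (List (List (Int × Int))) :=
  d.modify pr.1 [] (fun l => l ++ [pr.2])

def pvKeyed (board : List (List String)) (left : List Char) (path : List (Int × Int)) :
    List (List Char × List (Int × Int)) :=
  (pvAllPaths board left path).map (fun p => (path_to_word board p, p))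

def pvMatch (board : List (List String)) (c : Int × Int) (W : List Char) : Bool :=
  pvCellChars board c == ((PySem.List.pyGet? W 0).map (fun ch => [ch])).getD []

def pvBigMods (board : List (List String)) (words : List String) :
    List (List Char × List (Int × Int)) :=
  (pvCells board).flatMap
    (fun c => words.flatMap
      (fun w => if pvMatch board c w.toList then pvKeyed board (w.toList.drop 1) [c] else []))

def pvValAt (board : List (List String)) (words : List String) (W : List Char) :
    List (List (Int × Int)) :=
  ((pvBigMods board words).filter (fun pr => pr.1 == W)).map (fun pr => pr.2)

def pvF (board : List (List String)) (W : List Char) : Option (List (Int × Int)) :=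
  (pvCells board).findSome?
    (fun c => if pvMatch board c W then (pvAllPaths board (W.drop 1) [c]).head? else none)

theorem ptw_eq_flatMap (board : List (List String)) (p : List (Int × Int)) :
    path_to_word board p = p.flatMap (pvCellChars board) := by
  rw [path_to_word, PySem.List.foldl_append_eq_flatMap]; simp

theorem fill_eq (board : List (List String)) (left : List Char) (path : List (Int × Int))
    (d : PySem.Dict (List Char) (List (List (Int × Int)))) :
    pvFill board left path d = (pvKeyed board left path).foldl pvStep d := by
  induction left generalizing path d with
  | nil => simp [pvFill, pvKeyed, pvAllPaths, pvStep]
  | cons c rest ih =>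
    rw [pvKeyed, pvAllPaths, List.map_flatMap, List.foldl_flatMap, pvFill]
    refine PySem.List.foldl_congr_mem _ _ _ d ?_
    intro d' nc _
    by_cases h1 : nc ∉ path
    · by_cases h2 : still_in_board board nc
      · by_cases h3 : pvCellChars board nc == [c]
        · simp [h1, h2, h3, ih, pvKeyed]
        · simp [h1, h2, h3]
      · simp [h1, h2]
    · simp [h1]

theorem allPaths_mem (board : List (List String)) (left : List Char)
    (path p : List (Int × Int)) (hp : p ∈ pvAllPaths board left path) :
    path_to_word board p = path_to_word board path ++ left ∧
      p.length = path.length + left.length := by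
  induction left generalizing path p with
  | nil =>
    simp [pvAllPaths] at hp
    simp [hp]
  | cons c rest ih =>
    rw [pvAllPaths, List.mem_flatMap] at hp
    obtain ⟨nc, -, hmem⟩ := hp
    by_cases h1 : nc ∉ path
    · by_cases h2 : still_in_board board nc
      · by_cases h3 : pvCellChars board nc == [c]
        · simp only [h1, h2, h3, if_pos] at hmem
          obtain ⟨hw, hl⟩ := ih (path ++ [nc]) p hmem
          constructor
          · rw [hw, ptw_eq_flatMap, List.flatMap_append, ← ptw_eq_flatMap]
            simp [beq_iff_eq.mp h3]
          · simp only [List.length_append, List.length_cons, List.length_nil] at hl ⊢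
            omega
        · simp [h1, h2, h3] at hmem
      · simp [h1, h2] at hmem
    · simp [h1] at hmem

theorem findSome?_congr_mem {α β : Type} (l : List α) (f g : α → Option β)
    (h : ∀ x ∈ l, f x = g x) : l.findSome? f = l.findSome? g := by
  induction l with
  | nil => rfl
  | cons a l ih =>
    rw [List.findSome?_cons, List.findSome?_cons, h a (by simp)]
    cases g a with
    | none => exact ih (fun x hx => h x (by simp [hx]))
    | some b => rfl

theorem rowlen_eq (board : List (List String))
    (hrect : ∀ row ∈ board, row.length = (board.headD []).length)
    {x : Int} (h0 : 0 ≤ x) (h1 : x < (board.length : Int)) :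
    (PySem.List.pyGetD board x []).length = (PySem.List.pyGetD board 0 []).length := by
  obtain ⟨k, rfl⟩ := Int.eq_ofNat_of_zero_le h0
  have hk : k < board.length := by exact_mod_cast h1
  rw [PySem.List.pyGetD_natCast]
  have h00 : PySem.List.pyGetD board 0 [] = board.getD 0 [] := by
    exact_mod_cast PySem.List.pyGetD_natCast board 0 []
  rw [h00, List.getD_eq_getElem _ _ hk, List.getD_eq_getElem _ _ (by omega)]
  rw [hrect _ (List.getElem_mem _), hrect _ (List.getElem_mem _)]

theorem still_iff (board : List (List String)) (nc : Int × Int) :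
    still_in_board board nc = true ↔
      ((0 ≤ nc.1 ∧ nc.1 < (board.length : Int)) ∧
        (0 ≤ nc.2 ∧ nc.2 < ((PySem.List.pyGetD board 0 []).length : Int))) := by
  simp [still_in_board]

theorem firstPath_eq (board : List (List String))
    (hrect : ∀ row ∈ board, row.length = (board.headD []).length)
    (left : List Char) (path : List (Int × Int)) :
    pvFirstPath board path left = (pvAllPaths board left path).head? := by
  induction left generalizing path with
  | nil => simp [pvFirstPath, pvAllPaths]
  | cons c rest ih =>
    rw [pvFirstPath, pvAllPaths, List.head?_flatMap, pvNeighbors]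
    refine findSome?_congr_mem _ _ _ ?_
    intro nc _
    by_cases h1 : nc ∉ path
    · by_cases hx : 0 ≤ nc.1 ∧ nc.1 < (board.length : Int)
      · have hrow := rowlen_eq board hrect hx.1 hx.2
        by_cases hy : 0 ≤ nc.2 ∧ nc.2 < ((PySem.List.pyGetD board nc.1 []).length : Int)
        · have hsib : still_in_board board nc = true :=
            (still_iff board nc).mpr ⟨hx, hy.1, by rw [← Nat.cast_inj (R := Int)] at hrow; omega⟩
          by_cases h3 : pvCellChars board nc = [c]
          · simp [h1, hx, hy, h3, hsib, ih]
          · simp [h1, hx, hy, h3, hsib]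
        · have hsib : still_in_board board nc = false := by
            rw [Bool.eq_false_iff, Ne, still_iff]
            rw [← Nat.cast_inj (R := Int)] at hrow
            intro hc
            exact hy ⟨hc.2.1, by omega⟩
          simp [h1, hx, hy, hsib]
      · have hsib : still_in_board board nc = false := by
          rw [Bool.eq_false_iff, Ne, still_iff]
          tauto
        simp [h1, hx, hsib]
    · simp [h1]

theorem mlp_eq (v : List (List (Int × Int))) (L : Nat) (hL : 0 < L)
    (hv : ∀ p ∈ v, p.length = L) : pvMaxLenPath v = v.head? := by
  have hconst : ∀ (vs : List (List (Int × Int))) (a : Option (List (Int × Int)) × Nat),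
      (∀ p ∈ vs, ¬ (p.length > a.2)) →
      vs.foldl (fun acc path => if path.length > acc.2 then (some path, path.length) else acc) a
        = a := by
    intro vs
    induction vs with
    | nil => intro a _; rfl
    | cons p vs ih =>
      intro a ha
      rw [List.foldl_cons, if_neg (ha p (by simp))]
      exact ih a (fun q hq => ha q (by simp [hq]))
  cases v with
  | nil => rfl
  | cons v vs =>
    rw [pvMaxLenPath, List.foldl_cons]
    rw [if_pos (by simpa [hv v (by simp)] using hL)]
    rw [hconst vs _ (fun q hq => by simp [hv q (by simp [hq]), hv v (by simp)])]
    rfl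

theorem cells_ne (board : List (List String))
    (hrect : ∀ row ∈ board, row.length = (board.headD []).length)
    {c : Int × Int} (hc : c ∈ pvCells board) : board.headD [] ≠ [] := by
  simp only [pvCells, List.mem_flatMap, List.mem_map, List.mem_range] at hc
  obtain ⟨i, hi, hj⟩ := hc
  intro h0
  obtain ⟨a, ha, -⟩ := hj
  rw [List.getD_eq_getElem _ _ hi] at ha
  have hlen := hrect _ (List.getElem_mem hi)
  rw [h0] at hlen
  simp [hlen] at ha

theorem words_ne (board : List (List String)) (words : List String)
    (hrect : ∀ row ∈ board, row.length = (board.headD []).length)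
    (hcorner : ¬(board.headD [] ≠ [] ∧ "" ∈ words))
    {c : Int × Int} (hc : c ∈ pvCells board) : ∀ w ∈ words, w.toList ≠ [] := by
  intro w hw h
  have hwe : w = "" := String.toList_eq_nil_iff.mp h
  exact hcorner ⟨cells_ne board hrect hc, hwe ▸ hw⟩

theorem pyGet0_cons {α : Type} (x : α) (l : List α) :
    PySem.List.pyGet? (x :: l) (0 : Int) = some x := by
  simp [PySem.List.pyGet?, PySem.List.pyIdx?]

theorem match_iff (board : List (List String)) (c : Int × Int) (ch : Char) (t : List Char) :
    pvMatch board c (ch :: t) = true ↔ pvCellChars board c = [ch] := by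
  rw [pvMatch, pyGet0_cons]
  simp

theorem ptw_single (board : List (List String)) (c : Int × Int) :
    path_to_word board [c] = pvCellChars board c := by
  simp [ptw_eq_flatMap]

theorem bigMods_key (board : List (List String)) (words : List String)
    (hrect : ∀ row ∈ board, row.length = (board.headD []).length)
    (hcorner : ¬(board.headD [] ≠ [] ∧ "" ∈ words)) :
    ∀ pr ∈ pvBigMods board words,
      pr.1 ∈ words.map (fun w => w.toList) ∧ pr.2.length = pr.1.length ∧ pr.1 ≠ [] := by
  intro pr hpr
  rw [pvBigMods, List.mem_flatMap] at hpr
  obtain ⟨c, hc, hpr⟩ := hpr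
  rw [List.mem_flatMap] at hpr
  obtain ⟨w, hw, hpr⟩ := hpr
  by_cases hm : pvMatch board c w.toList = true
  · rw [if_pos hm, pvKeyed, List.mem_map] at hpr
    obtain ⟨p, hp, rfl⟩ := hpr
    obtain ⟨ch, t, hwl⟩ : ∃ ch t, w.toList = ch :: t := by
      cases hwl : w.toList with
      | nil => exact absurd hwl (words_ne board words hrect hcorner hc w hw)
      | cons a b => exact ⟨a, b, rfl⟩
    rw [hwl] at hm
    have hcell := (match_iff board c ch t).mp hm
    obtain ⟨hk, hl⟩ := allPaths_mem board _ _ _ hp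
    have hkey : path_to_word board p = w.toList := by
      rw [hk, ptw_single, hcell, hwl]; simp
    refine ⟨List.mem_map.mpr ⟨w, hw, hkey.symm⟩, ?_, by rw [hkey, hwl]; simp⟩
    rw [hkey, hl, hwl]
    simp [Nat.add_comm]
  · rw [if_neg hm] at hpr
    simp at hpr

theorem findSome?_if_eq {α β κ : Type} [DecidableEq κ] (l : List α) (f : α → κ) (W : κ)
    (o : Option β) (hW : W ∈ l.map f) :
    l.findSome? (fun w => if f w = W then o else none) = o := by
  induction l with
  | nil => simp at hW
  | cons a l ih =>
    rw [List.findSome?_cons]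
    by_cases h : f a = W
    · rw [if_pos h]
      cases o with
      | some b => rfl
      | none => simp
    · rw [if_neg h]
      rw [List.map_cons, List.mem_cons] at hW
      exact ih (hW.resolve_left (fun he => h he.symm))

theorem valAt_head (board : List (List String)) (words : List String)
    (hrect : ∀ row ∈ board, row.length = (board.headD []).length)
    (hcorner : ¬(board.headD [] ≠ [] ∧ "" ∈ words))
    (W : List Char) (hW : W ∈ words.map (fun w => w.toList)) :
    (pvValAt board words W).head? = pvF board W := by
  rw [pvValAt, pvBigMods, pvF]
  rw [List.filter_flatMap, List.map_flatMap, List.head?_flatMap]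
  refine findSome?_congr_mem _ _ _ ?_
  intro c hc
  rw [List.filter_flatMap, List.map_flatMap, List.head?_flatMap]
  have hin : ∀ w ∈ words,
      ((((if pvMatch board c w.toList then pvKeyed board (w.toList.drop 1) [c] else []).filter
          (fun pr => pr.1 == W)).map (fun pr => pr.2)).head?)
        = (if w.toList = W then
            (if pvMatch board c W then (pvAllPaths board (W.drop 1) [c]).head? else none)
          else none) := by
    intro w hw
    have hwne := words_ne board words hrect hcorner hc w hw
    obtain ⟨ch, t, hwl⟩ : ∃ ch t, w.toList = ch :: t := by
      cases hwl : w.toList with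
      | nil => exact absurd hwl hwne
      | cons a b => exact ⟨a, b, rfl⟩
    by_cases hm : pvMatch board c w.toList = true
    · have hkeys : ∀ p ∈ pvAllPaths board (w.toList.drop 1) [c],
          path_to_word board p = w.toList := by
        intro p hp
        obtain ⟨hk, -⟩ := allPaths_mem board _ _ _ hp
        rw [hwl] at hm
        rw [hk, ptw_single, (match_iff board c ch t).mp hm, hwl]
        simp
      rw [if_pos hm, pvKeyed, List.filter_map]
      by_cases hWw : w.toList = W
      · subst hWw
        have hfc : ((pvAllPaths board (w.toList.drop 1) [c]).filter
            ((fun pr => pr.1 == w.toList) ∘ (fun p => (path_to_word board p, p))))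
            = pvAllPaths board (w.toList.drop 1) [c] := by
          rw [List.filter_congr (q := fun _ => true) (by
            intro p hp
            simp [Function.comp_apply, hkeys p hp])]
          exact List.filter_true _
        rw [hfc, List.map_map]
        have hid : ((fun pr => pr.2) ∘ (fun p => ((path_to_word board p, p) : List Char × List (Int × Int)))) = id := rfl
        rw [hid, List.map_id, if_pos rfl, if_pos hm]
      · have hfc : ((pvAllPaths board (w.toList.drop 1) [c]).filter
            ((fun pr => pr.1 == W) ∘ (fun p => (path_to_word board p, p))))
            = [] := by
          rw [List.filter_congr (q := fun _ => false) (by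
            intro p hp
            simp [Function.comp_apply, hkeys p hp, hWw])]
          exact List.filter_false _
        rw [hfc]
        simp [hWw]
    · rw [if_neg hm]
      simp only [List.filter_nil, List.map_nil, List.head?_nil]
      by_cases hWw : w.toList = W
      · subst hWw
        rw [if_pos rfl, if_neg hm]
      · rw [if_neg hWw]
  rw [findSome?_congr_mem _ _ _ hin]
  exact findSome?_if_eq words _ W _ hW

theorem dictLoop_eq (board : List (List String)) (words : List String)
    (d : PySem.Dict (List Char) (List (List (Int × Int)))) :
    (PySem.List.pyRange 0 (board.length : Int) 1).foldl
      (fun d i =>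
        (PySem.List.pyRange 0 ((PySem.List.pyGetD board i []).length : Int) 1).foldl
          (fun d j =>
            words.foldl
              (fun d w =>
                if pvCellChars board (i, j) ==
                    ((PySem.List.pyGet? w.toList 0).map (fun ch => [ch])).getD [] then
                  pvFill board (PySem.List.slice w.toList (some 1) none) [(i, j)] d
                else d)
              d)
          d)
      d
    = (pvBigMods board words).foldl pvStep d := by
  rw [pvBigMods, List.foldl_flatMap, pvCells, List.foldl_flatMap]
  rw [PySem.List.pyRange_zero_nat, List.foldl_map]
  refine PySem.List.foldl_congr_mem _ _ _ d ?_
  intro a i _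
  have hcast : ((PySem.List.pyGetD board (↑i : Int) []).length : Int)
      = ((board.getD i []).length : Int) := by rw [PySem.List.pyGetD_natCast]
  rw [hcast, PySem.List.pyRange_zero_nat]
  conv_lhs => rw [List.foldl_map]
  conv_rhs => rw [List.foldl_map]
  refine PySem.List.foldl_congr_mem _ _ _ a ?_
  intro a' j _
  rw [List.foldl_flatMap]
  refine PySem.List.foldl_congr_mem _ _ _ a' ?_
  intro a'' w _
  by_cases hm : pvMatch board ((i : Int), (j : Int)) w.toList = true
  · have hm' := hm
    rw [pvMatch] at hm'
    rw [if_pos hm', if_pos hm, PySem.List.slice_from _ (show (0:Int) ≤ 1 by norm_num), fill_eq]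
    rfl
  · have hm' := hm
    rw [pvMatch] at hm'
    rw [if_neg hm', if_neg hm]
    rfl

theorem d0_getD (words : List String) (W : List Char) :
    (words.foldl (fun d w => d.insert w.toList []) PySem.Dict.empty).getD W
      ([] : List (List (Int × Int))) = [] := by
  have h : ∀ (d : PySem.Dict (List Char) (List (List (Int × Int)))), d.getD W [] = [] →
      (words.foldl (fun d w => d.insert w.toList []) d).getD W [] = [] := by
    induction words with
    | nil => intro d hd; exact hd
    | cons w ws ih =>
      intro d hd
      rw [List.foldl_cons]
      refine ih _ ?_
      rw [PySem.Dict.getD_insert]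
      split_ifs
      · rfl
      · exact hd
  exact h _ (PySem.Dict.getD_empty W [])

theorem update_self_of_subset {α : Type} [BEq α] [LawfulBEq α] (xs : List α) :
    ∀ (s : PySem.Set α), (∀ x ∈ xs, x ∈ s) → PySem.Set.update s xs = s := by
  induction xs with
  | nil => intro s _; exact PySem.Set.update_nil s
  | cons x xs ih =>
    intro s hs
    rw [PySem.Set.update_cons, PySem.Set.add_of_mem (hs x (by simp))]
    exact ih s (fun y hy => hs y (by simp [hy]))

theorem update_empty_eq_ofList {α : Type} [BEq α] (xs : List α) :
    PySem.Set.update ([] : PySem.Set α) xs = PySem.Set.ofList xs := by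
  rw [PySem.Set.ofList_eq_foldl]; rfl

theorem ofList_map_toList (l : List String) :
    PySem.Set.ofList (l.map (fun w => w.toList)) = (PySem.Set.ofList l).map (fun w => w.toList) := by
  induction l with
  | nil => rfl
  | cons a l ih =>
    rw [List.map_cons, PySem.Set.ofList_cons, PySem.Set.ofList_cons, List.map_cons, ih]
    congr 1
    rw [PySem.Set.discard, PySem.Set.discard, List.filter_map]
    congr 1
    refine List.filter_congr ?_
    intro y _
    simp only [Function.comp_apply]
    by_cases h : y = a
    · simp [h]
    · have hne : y.toList ≠ a.toList := fun hh => h (String.toList_inj.mp hh)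
      simp [h, hne]

theorem filter_map_massage {κ β γ : Type} (l : List κ) (g : κ → List β) (h : List β → γ) :
    ((l.map g).filter (fun v => !v.isEmpty)).map (fun v => h v)
      = l.filterMap (fun x => if g x = [] then none else some (h (g x))) := by
  induction l with
  | nil => rfl
  | cons a l ih =>
    rw [List.map_cons, List.filter_cons, List.filterMap_cons]
    by_cases he : g a = []
    · simp [he, ih]
    · simp [he, ih]

theorem valAt_entry (board : List (List String)) (words : List String)
    (hrect : ∀ row ∈ board, row.length = (board.headD []).length)
    (hcorner : ¬(board.headD [] ≠ [] ∧ "" ∈ words))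
    (W : List Char) :
    (if pvValAt board words W = [] then none
     else some ((pvMaxLenPath (pvValAt board words W)).getD []))
    = (pvValAt board words W).head? := by
  have hlen : ∀ p ∈ pvValAt board words W, p.length = W.length := by
    intro p hp
    rw [pvValAt, List.mem_map] at hp
    obtain ⟨pr, hpr, rfl⟩ := hp
    rw [List.mem_filter] at hpr
    obtain ⟨hpr, hq⟩ := hpr
    obtain ⟨-, hl, -⟩ := bigMods_key board words hrect hcorner pr hpr
    rw [hl, beq_iff_eq.mp hq]
  by_cases he : pvValAt board words W = []
  · rw [if_pos he, he]
    rfl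
  · cases hv : pvValAt board words W with
    | nil => exact absurd hv he
    | cons v vs =>
      have hWpos' : True := trivial
      have hWpos : 0 < W.length := by
        have hmem : v ∈ pvValAt board words W := by rw [hv]; simp
        rw [pvValAt, List.mem_map] at hmem
        obtain ⟨pr, hpr, rfl⟩ := hmem
        rw [List.mem_filter] at hpr
        obtain ⟨hpr, hq⟩ := hpr
        obtain ⟨-, -, hne⟩ := bigMods_key board words hrect hcorner pr hpr
        rw [← beq_iff_eq.mp hq]
        exact List.length_pos_of_ne_nil hne
      have hmlp := mlp_eq (v :: vs) W.length hWpos (hv ▸ hlen)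
      rw [if_neg (by simp), hmlp]
      simp

-- B-side: the seen-set loop emits, per first occurrence of a word, its found path
def pvGopt (board : List (List String)) (w : String) : Option (List (Int × Int)) :=
  let found :=
    (pvCells board).findSome?
      (fun c =>
        if pvCellChars board c ==
            ((PySem.List.pyGet? w.toList 0).map (fun ch => [ch])).getD [] then
          pvFirstPath board [c] (PySem.List.slice w.toList (some 1) none)
        else none)
  if (found.getD []).isEmpty then none else some (found.getD [])

def pvDedupNew (s : PySem.Set String) : List String → List String
  | [] => []
  | w :: ws => if s.contains w then pvDedupNew s ws else w :: pvDedupNew (s.add w) ws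

theorem update_eq_append_dedupNew (ws : List String) :
    ∀ s : PySem.Set String, PySem.Set.update s ws = s ++ pvDedupNew s ws := by
  induction ws with
  | nil => intro s; rw [PySem.Set.update_nil, pvDedupNew]; simp
  | cons w ws ih =>
    intro s
    rw [PySem.Set.update_cons, pvDedupNew]
    by_cases hc : s.contains w = true
    · rw [if_pos hc, PySem.Set.add_of_mem ((PySem.Set.contains_iff s w).mp hc), ih]
    · have hnm : w ∉ s := fun hm => hc ((PySem.Set.contains_iff s w).mpr hm)
      rw [if_neg hc, PySem.Set.add_of_not_mem hnm, ih]
      simp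

theorem dedupNew_empty (ws : List String) :
    pvDedupNew PySem.Set.empty ws = PySem.Set.ofList ws := by
  have h := update_eq_append_dedupNew ws ([] : PySem.Set String)
  rw [update_empty_eq_ofList] at h
  have h2 : pvDedupNew ([] : PySem.Set String) ws = PySem.Set.ofList ws := by
    simpa using h.symm
  exact h2

theorem alt_fold (board : List (List String)) (ws : List String) :
    ∀ (res : List (List (Int × Int))) (s : PySem.Set String),
    (ws.foldl
      (fun (acc : List (List (Int × Int)) × PySem.Set String) w =>
        if acc.2.contains w then acc
        else
          let found :=
            (pvCells board).findSome?
              (fun c =>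
                if pvCellChars board c ==
                    ((PySem.List.pyGet? w.toList 0).map (fun ch => [ch])).getD [] then
                  pvFirstPath board [c] (PySem.List.slice w.toList (some 1) none)
                else none)
          ((if (found.getD []).isEmpty then acc.1 else acc.1 ++ [found.getD []]),
            acc.2.add w))
      (res, s)).1 = res ++ (pvDedupNew s ws).filterMap (pvGopt board) := by
  induction ws with
  | nil => intro res s; simp [pvDedupNew]
  | cons w ws ih =>
    intro res s
    rw [List.foldl_cons, pvDedupNew]
    by_cases hc : s.contains w = true
    · rw [if_pos hc]
      rw [ih res s]
      rw [if_pos hc]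
    · rw [if_neg hc, if_neg hc]
      rw [List.filterMap_cons]
      cases hg : pvGopt board w with
      | none =>
        have h2 : (((pvCells board).findSome?
            (fun c =>
              if pvCellChars board c ==
                  ((PySem.List.pyGet? w.toList 0).map (fun ch => [ch])).getD [] then
                pvFirstPath board [c] (PySem.List.slice w.toList (some 1) none)
              else none)).getD []).isEmpty = true := by
          by_contra hne
          simp only [pvGopt] at hg
          rw [if_neg hne] at hg
          simp at hg
        rw [ih, if_pos h2]
      | some p =>
        have h2 : (((pvCells board).findSome?
            (fun c =>
              if pvCellChars board c ==
                  ((PySem.List.pyGet? w.toList 0).map (fun ch => [ch])).getD [] then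
                pvFirstPath board [c] (PySem.List.slice w.toList (some 1) none)
              else none)).getD []).isEmpty = false ∧
            ((pvCells board).findSome?
            (fun c =>
              if pvCellChars board c ==
                  ((PySem.List.pyGet? w.toList 0).map (fun ch => [ch])).getD [] then
                pvFirstPath board [c] (PySem.List.slice w.toList (some 1) none)
              else none)).getD [] = p := by
          simp only [pvGopt] at hg
          by_cases hne : (((pvCells board).findSome?
              (fun c =>
                if pvCellChars board c ==
                    ((PySem.List.pyGet? w.toList 0).map (fun ch => [ch])).getD [] then
                  pvFirstPath board [c] (PySem.List.slice w.toList (some 1) none)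
                else none)).getD []).isEmpty = true
          · rw [if_pos hne] at hg
            exact absurd hg (by simp)
          · rw [if_neg hne] at hg
            exact ⟨by simpa using hne, Option.some.inj hg⟩
        rw [ih, if_neg (by rw [h2.1]; exact Bool.false_ne_true), h2.2]
        simp

theorem gopt_eq (board : List (List String))
    (hrect : ∀ row ∈ board, row.length = (board.headD []).length) (w : String) :
    pvGopt board w = pvF board w.toList := by
  have hfound : (pvCells board).findSome?
      (fun c =>
        if pvCellChars board c ==
            ((PySem.List.pyGet? w.toList 0).map (fun ch => [ch])).getD [] then
          pvFirstPath board [c] (PySem.List.slice w.toList (some 1) none)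
        else none)
      = pvF board w.toList := by
    rw [pvF]
    refine findSome?_congr_mem _ _ _ ?_
    intro c _
    rw [PySem.List.slice_from _ (show (0:Int) ≤ 1 by norm_num), firstPath_eq board hrect]
    rfl
  simp only [pvGopt]
  rw [hfound]
  cases hF : pvF board w.toList with
  | none => simp
  | some p =>
    have hpne : p ≠ [] := by
      rw [pvF, List.findSome?_eq_some_iff] at hF
      obtain ⟨l₁, c, l₂, -, hc, -⟩ := hF
      by_cases hm : pvMatch board c w.toList = true
      · rw [if_pos hm] at hc
        have hmem := List.mem_of_mem_head? hc
        obtain ⟨-, hl⟩ := allPaths_mem board _ _ _ hmem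
        intro hnil
        rw [hnil] at hl
        simp at hl
        omega
      · rw [if_neg hm] at hc; simp at hc
    simp [List.isEmpty_iff, hpne]

-- ===== VERDICT (by name: the statement is the Claim_ definition above) =====
theorem max_score_paths_spec : Claim_equal_max_score_paths := by
  unfold Claim_equal_max_score_paths
  intro board words _ hpre
  obtain ⟨hrect, hcorner⟩ := hpre
  rw [Spec_max_score_paths]
  have hstep : (fun (d : PySem.Dict (List Char) (List (List (Int × Int)))) (pr : List Char × List (Int × Int)) => d.modify pr.1 [] (fun l => l ++ [pr.2])) = pvStep := rfl
  -- A as a filterMap over the deduped word list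
  have hA : max_score_paths board words
      = (PySem.Set.ofList (words.map (fun w => w.toList))).filterMap (fun W => pvF board W) := by
    rw [max_score_paths]
    simp only [dictLoop_eq board words]
    set d1 := (pvBigMods board words).foldl pvStep
      (words.foldl (fun d w => d.insert w.toList []) PySem.Dict.empty) with hd1
    have hkeys0 : (words.foldl (fun d w => d.insert w.toList [])
          (PySem.Dict.empty : PySem.Dict (List Char) (List (List (Int × Int))))).keys
        = PySem.Set.ofList (words.map (fun w => w.toList)) := by
      have h := PySem.Dict.keys_foldl_insert_key words (fun w => w.toList)
        (fun _ _ => ([] : List (List (Int × Int)))) PySem.Dict.empty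
      rw [PySem.Dict.keys_empty, update_empty_eq_ofList] at h
      exact h
    have hkeys1 : d1.keys = PySem.Set.ofList (words.map (fun w => w.toList)) := by
      rw [hd1, ← hstep]
      have h := PySem.Dict.keys_foldl_modify_key (pvBigMods board words)
        (fun pr => pr.1) ([] : List (List (Int × Int)))
        (fun _ pr => (fun l => l ++ [pr.2]))
        (words.foldl (fun d w => d.insert w.toList []) PySem.Dict.empty)
      rw [hkeys0] at h
      rw [h]
      refine update_self_of_subset _ _ ?_
      intro x hx
      rw [List.mem_map] at hx
      obtain ⟨pr, hpr, rfl⟩ := hx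
      exact (PySem.Set.mem_ofList _ _).mpr (bigMods_key board words hrect hcorner pr hpr).1
    have hgetD : ∀ W, d1.getD W [] = pvValAt board words W := by
      intro W
      rw [hd1, ← hstep, PySem.Dict.getD_foldl_modify_append, d0_getD, List.nil_append, pvValAt]
    have hvals : d1.values
        = (PySem.Set.ofList (words.map (fun w => w.toList))).map
            (fun W => pvValAt board words W) := by
      rw [PySem.Dict.values_eq_map_keys d1 (by rw [hkeys1]; exact PySem.Set.nodup_ofList _) []]
      rw [hkeys1]
      exact List.map_congr_left (fun W _ => hgetD W)
    rw [hvals, filter_map_massage]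
    refine List.filterMap_congr ?_
    intro W hW
    have hWmem : W ∈ words.map (fun w => w.toList) :=
      (PySem.Set.mem_ofList _ _).mp hW
    rw [valAt_entry board words hrect hcorner W,
      valAt_head board words hrect hcorner W hWmem]
  -- B as the same filterMap
  have hB : max_score_paths_alt board words
      = (PySem.Set.ofList words).filterMap (pvGopt board) := by
    rw [max_score_paths_alt, alt_fold board words [] PySem.Set.empty, dedupNew_empty]
    simp
  rw [hA, hB, ofList_map_toList, List.filterMap_map]
  refine List.filterMap_congr ?_
  intro w _
  exact (gopt_eq board hrect w).symm
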